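-- pv_equiv track=rewrite | github.com/domokane/FinancePy | pep8_converter/run_pep8_converter.py | remove_blank_lines_before_defs
-- ===== SOURCE A (Python) =====
-- def remove_blank_lines_before_defs(source: str) -> str:
--     """Remove blank lines before function or class definitions."""
--     lines = source.splitlines()
--     new_lines = []
--     for i, line in enumerate(lines):
--         stripped = line.strip()
--         if stripped.startswith(("def ", "class ")):
--             while new_lines and new_lines[-1].strip() == "":
--                 new_lines.pop()
--         new_lines.append(line)
--     return "\n".join(new_lines) + "\n"
-- ===== SOURCE B (Python) =====
-- def remove_blank_lines_before_defs(source: str) -> str: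
--     """Remove blank lines before function or class definitions."""
--     out = []
--     blanks = []  # pending whitespace-only lines
--     for line in source.splitlines():
--         stripped = line.strip()
--         if stripped == "":
--             blanks.append(line)
--         else:
--             if not stripped.startswith(("def ", "class ")):
--                 out.extend(blanks)
--             blanks = []
--             out.append(line)
--     out.extend(blanks)
--     return "\n".join(out) + "\n"
-- ===== Notes on version B (the rewrite author's own statement) =====
-- stated objective: alternative
-- what changed: Single forward pass buffering pending blank lines and discarding or flushing the buffer at each non-blank line, instead of retroactively popping trailing blanks from the output when a def/class line is reached.
import Mathlib
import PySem

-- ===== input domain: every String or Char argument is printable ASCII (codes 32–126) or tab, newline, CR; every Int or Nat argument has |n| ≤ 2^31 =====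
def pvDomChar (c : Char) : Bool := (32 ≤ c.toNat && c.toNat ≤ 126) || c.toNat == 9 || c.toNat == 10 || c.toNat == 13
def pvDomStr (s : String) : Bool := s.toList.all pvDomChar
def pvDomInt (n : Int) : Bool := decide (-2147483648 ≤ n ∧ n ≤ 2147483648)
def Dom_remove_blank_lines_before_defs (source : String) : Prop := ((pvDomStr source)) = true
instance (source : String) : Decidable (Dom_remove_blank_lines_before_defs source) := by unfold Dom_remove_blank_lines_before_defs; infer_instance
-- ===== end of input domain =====

-- B buffers pending blank lines in a single forward pass instead of A's retroactive pops; same O(n) cost (objective: alternative).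

-- ===== PORT A =====
-- blank test: line.strip() == ""
def pvBlank (l : String) : Bool := PySem.Str.strip l == ""

-- stripped.startswith(("def ", "class ")) with stripped = line.strip(), as both Pythons compute it
def pvIsDef (line : String) : Bool :=
  let stripped := PySem.Str.strip line
  PySem.Str.startswith stripped "def " || PySem.Str.startswith stripped "class "

-- the 'while new_lines and new_lines[-1].strip() == "": new_lines.pop()' loop,
-- run on the REVERSED list (popping the last element = dropping the head of the reverse); exact
def pvPopRev : List String → List String
  | [] => []
  | l :: rest => if pvBlank l then pvPopRev rest else l :: rest

-- one iteration of A's for-loop body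
def pvStepA (acc : List String) (line : String) : List String :=
  (if pvIsDef line then (pvPopRev acc.reverse).reverse else acc) ++ [line]

def remove_blank_lines_before_defs (source : String) : String :=
  PySem.Str.join "\n" ((PySem.Str.splitlines source).foldl pvStepA []) ++ "\n"

-- ===== PORT B =====
-- one iteration of B's for-loop body over the state (out, blanks)
def pvStepB (st : List String × List String) (line : String) : List String × List String :=
  if pvBlank line then (st.1, st.2 ++ [line])
  else if pvIsDef line then (st.1 ++ [line], [])
  else (st.1 ++ st.2 ++ [line], [])

def remove_blank_lines_before_defs_alt (source : String) : String :=
  PySem.Str.join "\n"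
    (((PySem.Str.splitlines source).foldl pvStepB ([], [])).1 ++
      ((PySem.Str.splitlines source).foldl pvStepB ([], [])).2) ++ "\n"

-- ===== PRECONDITION & SPEC =====
def Spec_remove_blank_lines_before_defs (source : String) (out : String) : Prop := out = remove_blank_lines_before_defs_alt source
instance (source : String) (out : String) : Decidable (Spec_remove_blank_lines_before_defs source out) := by unfold Spec_remove_blank_lines_before_defs; infer_instance

-- ===== CLAIM (what is proved, stated in full; the proofs are below) =====
def Claim_equal_remove_blank_lines_before_defs : Prop := ∀ (source : String), Dom_remove_blank_lines_before_defs source → Spec_remove_blank_lines_before_defs source (remove_blank_lines_before_defs source)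

-- ===== LEMMAS AND PROOFS =====

-- the invariant linking A's accumulator to B's state:
-- acc = out ++ blanks, every buffered line is blank, and out does not end in a blank line
def pvInv (acc : List String) (st : List String × List String) : Prop :=
  acc = st.1 ++ st.2 ∧ (∀ l ∈ st.2, pvBlank l = true) ∧
    (∀ l, st.1.getLast? = some l → pvBlank l = false)

lemma pvIsDef_of_blank (line : String) (h : pvBlank line = true) : pvIsDef line = false := by
  have hs : PySem.Str.strip line = "" := by simpa [pvBlank] using h
  simp [pvIsDef, hs]
  decide

lemma pvPopRev_blanks (bs xs : List String) (hb : ∀ l ∈ bs, pvBlank l = true) :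
    pvPopRev (bs ++ xs) = pvPopRev xs := by
  induction bs with
  | nil => rfl
  | cons b bs ih =>
      simp only [List.cons_append, pvPopRev, hb b (by simp), if_true]
      exact ih (fun l hl => hb l (by simp [hl]))

lemma pvPopRev_nonblank (xs : List String)
    (h : ∀ l, xs.head? = some l → pvBlank l = false) : pvPopRev xs = xs := by
  cases xs with
  | nil => rfl
  | cons x xs => simp [pvPopRev, h x rfl]

lemma pvInv_step (acc : List String) (st : List String × List String) (line : String)
    (h : pvInv acc st) : pvInv (pvStepA acc line) (pvStepB st line) := by
  obtain ⟨h1, h2, h3⟩ := h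
  by_cases hb : pvBlank line = true
  · -- blank line: stripped = "", so it cannot start with "def " / "class "
    have hd := pvIsDef_of_blank line hb
    refine ⟨by simp [pvStepA, pvStepB, hb, hd, h1], ?_, ?_⟩
    · intro l hl
      simp only [pvStepB, hb, if_true] at hl
      rcases List.mem_append.1 hl with hl | hl
      · exact h2 l hl
      · simp at hl; subst hl; exact hb
    · intro l hl
      simp only [pvStepB, hb, if_true] at hl
      exact h3 l hl
  · have hbF : pvBlank line = false := by simpa using hb
    by_cases hd : pvIsDef line = true
    · -- def/class line: A pops exactly the buffered blanks st.2, keeping out intact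
      have hpop : (pvPopRev acc.reverse).reverse = st.1 := by
        have hrev : acc.reverse = st.2.reverse ++ st.1.reverse := by simp [h1]
        rw [hrev, pvPopRev_blanks _ _ (fun l hl => h2 l (List.mem_reverse.1 hl)),
          pvPopRev_nonblank _ (fun l hl => h3 l (by rwa [← List.head?_reverse]))]
        simp
      refine ⟨by simp [pvStepA, pvStepB, hbF, hd, hpop], ?_, ?_⟩
      · intro l hl
        simp [pvStepB, hbF, hd] at hl
      · intro l hl
        simp only [pvStepB, hbF, hd, Bool.false_eq_true, if_false, if_true] at hl
        simp only [List.getLast?_append, List.getLast?_singleton] at hl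
        simp at hl; subst hl; exact hbF
    · -- ordinary non-blank line: buffered blanks are flushed
      have hdF : pvIsDef line = false := by simpa using hd
      refine ⟨by simp [pvStepA, pvStepB, hbF, hdF, h1], ?_, ?_⟩
      · intro l hl
        simp [pvStepB, hbF, hdF] at hl
      · intro l hl
        simp only [pvStepB, hbF, hdF, Bool.false_eq_true, if_false,
          List.getLast?_append, List.getLast?_singleton] at hl
        simp at hl; subst hl; exact hbF

lemma pvInv_foldl (lines : List String) (acc : List String) (st : List String × List String)
    (h : pvInv acc st) : pvInv (lines.foldl pvStepA acc) (lines.foldl pvStepB st) := by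
  induction lines generalizing acc st with
  | nil => exact h
  | cons line lines ih =>
      rw [List.foldl_cons, List.foldl_cons]
      exact ih _ _ (pvInv_step acc st line h)

-- ===== VERDICT (by name: the statement is the Claim_ definition above) =====
theorem remove_blank_lines_before_defs_spec : Claim_equal_remove_blank_lines_before_defs := by
  intro source _
  have h := pvInv_foldl (PySem.Str.splitlines source) [] ([], [])
    ⟨rfl, by simp, by simp⟩
  unfold Spec_remove_blank_lines_before_defs remove_blank_lines_before_defs
    remove_blank_lines_before_defs_alt
  rw [h.1]
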